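-- pv_equiv track=rewrite | github.com/Baptistecaille/Manus | nodes/report_writer.py | _build_sources_list
-- ===== SOURCE A (Python) =====
-- from typing import List
--
-- def _build_sources_list(findings: List[dict]) -> str:
--     """Build numbered sources list."""
--     seen_urls = set()
--     sources = []
--
--     for f in findings:
--         url = f.get("source_url", "")
--         if url and url not in seen_urls:
--             seen_urls.add(url)
--             idx = f.get("source_index", len(sources) + 1)
--             title = f.get("source_title", "Unknown source")
--             sources.append(f"[{idx}] {title} - {url}")
--
--     return "\n".join(sources) if sources else "No sources available."
-- ===== SOURCE B (Python) =====
-- def _build_sources_list(findings):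
--     """Build numbered sources list: index-based, dedup by membership in the
--     url prefix (no auxiliary seen-set), then format the kept positions."""
--     urls = [f.get("source_url", "") for f in findings]
--     keep = [i for i, u in enumerate(urls) if u and u not in urls[:i]]
--     lines = [
--         "[{}] {} - {}".format(
--             findings[i].get("source_index", k),
--             findings[i].get("source_title", "Unknown source"),
--             urls[i],
--         )
--         for k, i in enumerate(keep, 1)
--     ]
--     return "\n".join(lines) if lines else "No sources available."
-- ===== Notes on version B (the rewrite author's own statement) =====
-- stated objective: alternative
-- what changed: B drops A's seen-set-plus-accumulator loop entirely: it precomputes the url list, selects the kept positions by testing each url against the prefix urls[:i] (index-based dedup, no auxiliary set), and then formats those positions with enumerate(keep, 1), trading A's O(n) set lookups for prefix scans.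
import Mathlib
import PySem

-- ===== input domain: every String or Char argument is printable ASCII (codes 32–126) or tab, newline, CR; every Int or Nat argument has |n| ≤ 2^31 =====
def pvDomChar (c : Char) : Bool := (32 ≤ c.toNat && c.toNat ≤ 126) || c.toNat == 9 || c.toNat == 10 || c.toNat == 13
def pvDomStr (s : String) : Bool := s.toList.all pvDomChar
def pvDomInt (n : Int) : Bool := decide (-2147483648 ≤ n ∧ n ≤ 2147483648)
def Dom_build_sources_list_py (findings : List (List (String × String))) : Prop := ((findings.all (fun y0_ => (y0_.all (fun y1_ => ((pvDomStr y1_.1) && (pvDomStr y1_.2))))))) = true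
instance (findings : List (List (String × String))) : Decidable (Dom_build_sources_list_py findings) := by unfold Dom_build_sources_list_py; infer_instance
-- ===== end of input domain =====

-- B replaces A's seen-set + accumulator loop by index-based selection: dedup by
-- membership in the url prefix urls[:i], then format the kept positions; same result.

-- ===== PORT A =====
-- one loop: seen set + formatted sources accumulator, index default = len(sources)+1
def build_sources_list_py (findings : List (List (String × String))) : String :=
  let st := findings.foldl
    (fun (st : PySem.Set String × List String) f =>
      let url := PySem.Dict.getD (PySem.Dict.mk f) "source_url" ""
      if url ≠ "" ∧ url ∉ st.1 then
        (PySem.Set.add st.1 url,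
         st.2 ++ ["[" ++ PySem.Dict.getD (PySem.Dict.mk f) "source_index" (PySem.Int.toStr ((st.2.length : Int) + 1))
                  ++ "] " ++ PySem.Dict.getD (PySem.Dict.mk f) "source_title" "Unknown source" ++ " - " ++ url])
      else st)
    (PySem.Set.empty, [])
  if st.2 ≠ [] then PySem.Str.join "\n" st.2 else "No sources available."

-- ===== PORT B =====
-- format position i (counter k): findings[i] / urls[i] ported with getD (i is in range)
def pvFmtB (findings : List (List (String × String))) (urls : List String)
    (k : Int) (i : Nat) : String :=
  let f := findings.getD i []
  "[" ++ PySem.Dict.getD (PySem.Dict.mk f) "source_index" (PySem.Int.toStr k)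
  ++ "] " ++ PySem.Dict.getD (PySem.Dict.mk f) "source_title" "Unknown source"
  ++ " - " ++ urls.getD i ""

-- urls list; `[i for i, u in enumerate(urls) if u and u not in urls[:i]]` ported as a
-- filter over the index range (urls[:i] = take i); then format enumerate(keep, 1)
def build_sources_list_py_alt (findings : List (List (String × String))) : String :=
  let urls := findings.map (fun f => PySem.Dict.getD (PySem.Dict.mk f) "source_url" "")
  let keep := (List.range urls.length).filter
      (fun i => decide (urls.getD i "" ≠ "" ∧ urls.getD i "" ∉ urls.take i))
  let lines := (PySem.List.enumerate keep 1).map (fun p => pvFmtB findings urls p.1 p.2)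
  if lines = [] then "No sources available." else PySem.Str.join "\n" lines

-- ===== PRECONDITION & SPEC =====
def Spec_build_sources_list_py (findings : List (List (String × String))) (out : String) : Prop := out = build_sources_list_py_alt findings
instance (findings : List (List (String × String))) (out : String) : Decidable (Spec_build_sources_list_py findings out) := by unfold Spec_build_sources_list_py; infer_instance

-- ===== CLAIM (what is proved, stated in full; the proofs are below) =====
def Claim_equal_build_sources_list_py : Prop := ∀ (findings : List (List (String × String))), Dom_build_sources_list_py findings → Spec_build_sources_list_py findings (build_sources_list_py findings)

-- ===== LEMMAS AND PROOFS =====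

def pvUrl (f : List (String × String)) : String :=
  PySem.Dict.getD (PySem.Dict.mk f) "source_url" ""

-- reference dedup threading the full url prefix (proof device shared by both sides)
def pvKeep (pre : List String) : List (List (String × String)) → List (List (String × String))
  | [] => []
  | f :: fs =>
    if pvUrl f ≠ "" ∧ pvUrl f ∉ pre then f :: pvKeep (pre ++ [pvUrl f]) fs
    else pvKeep (pre ++ [pvUrl f]) fs

def pvFmt (i : Int) (f : List (String × String)) : String :=
  "[" ++ PySem.Dict.getD (PySem.Dict.mk f) "source_index" (PySem.Int.toStr i)
  ++ "] " ++ PySem.Dict.getD (PySem.Dict.mk f) "source_title" "Unknown source"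
  ++ " - " ++ pvUrl f

-- A-side invariant: with seen-set s matching the nonempty urls of prefix `pre`,
-- A's fold appends the formatted pvKeep of the rest, numbered from acc.length+1
theorem pv_keyA (fs : List (List (String × String))) (s : PySem.Set String)
    (acc : List String) (pre : List String)
    (hs : ∀ u : String, u ≠ "" → (u ∈ s ↔ u ∈ pre)) :
    (fs.foldl
      (fun (st : PySem.Set String × List String) f =>
        let url := PySem.Dict.getD (PySem.Dict.mk f) "source_url" ""
        if url ≠ "" ∧ url ∉ st.1 then
          (PySem.Set.add st.1 url,
           st.2 ++ ["[" ++ PySem.Dict.getD (PySem.Dict.mk f) "source_index" (PySem.Int.toStr ((st.2.length : Int) + 1))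
                    ++ "] " ++ PySem.Dict.getD (PySem.Dict.mk f) "source_title" "Unknown source" ++ " - " ++ url])
        else st)
      (s, acc)).2
    = acc ++ (PySem.List.enumerate (pvKeep pre fs) ((acc.length : Int) + 1)).map
        (fun p => pvFmt p.1 p.2) := by
  induction fs generalizing s acc pre with
  | nil => simp [pvKeep]
  | cons f fs ih =>
    simp only [List.foldl_cons, pvKeep, pvUrl]
    have hcond : (PySem.Dict.getD (PySem.Dict.mk f) "source_url" "" ≠ "" ∧
        PySem.Dict.getD (PySem.Dict.mk f) "source_url" "" ∉ s) ↔
        (PySem.Dict.getD (PySem.Dict.mk f) "source_url" "" ≠ "" ∧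
        PySem.Dict.getD (PySem.Dict.mk f) "source_url" "" ∉ pre) :=
      and_congr_right fun h1 => not_congr (hs _ h1)
    split_ifs with h1 h2 h2
    · rw [ih _ _ (pre ++ [PySem.Dict.getD (PySem.Dict.mk f) "source_url" ""]) ?_,
        PySem.List.enumerate_cons, List.map_cons]
      · have hl : (((acc ++ [pvFmt ((acc.length : Int) + 1) f]).length : Int) + 1)
            = (acc.length : Int) + 1 + 1 := by simp
        simp [pvFmt, pvUrl]
      · intro u hu
        rw [PySem.Set.mem_add, List.mem_append, List.mem_singleton, hs _ hu]
    · exact absurd (hcond.mp h1) h2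
    · exact absurd (hcond.mpr h2) h1
    · refine ih _ _ (pre ++ [PySem.Dict.getD (PySem.Dict.mk f) "source_url" ""]) ?_
      intro u hu
      rw [hs _ hu, List.mem_append, List.mem_singleton]
      constructor
      · exact Or.inl
      · rintro (hm | rfl)
        · exact hm
        · rcases not_and_or.mp h2 with h3 | h3
          · exact absurd (not_not.mp h3) hu
          · exact not_not.mp h3


-- B-side: the filtered index range from j, formatted, equals formatted pvKeep of the
-- suffix from j with prefix urls.take j
theorem pv_keyB (findings : List (List (String × String)))
    (urls : List String) (hu : urls = findings.map pvUrl) :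
    ∀ (m j : Nat) (k : Int), j + m = findings.length →
    ((PySem.List.enumerate
        ((List.range' j m).filter
          (fun i => decide (urls.getD i "" ≠ "" ∧ urls.getD i "" ∉ urls.take i))) k).map
      (fun p => pvFmtB findings urls p.1 p.2))
    = (PySem.List.enumerate (pvKeep (urls.take j) (findings.drop j)) k).map
        (fun p => pvFmt p.1 p.2) := by
  intro m
  induction m with
  | zero =>
    intro j k hj
    have : findings.drop j = [] := by
      apply List.drop_eq_nil_of_le; omega
    simp [this, pvKeep]
  | succ m ih =>
    intro j k hj
    have hjlt : j < findings.length := by omega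
    have hdrop : findings.drop j = findings[j] :: findings.drop (j + 1) :=
      List.drop_eq_getElem_cons hjlt
    have hulen : urls.length = findings.length := by simp [hu]
    have hget : urls.getD j "" = pvUrl findings[j] := by
      rw [List.getD_eq_getElem _ _ (by omega)]
      simp [hu]
    have htake : urls.take (j + 1) = urls.take j ++ [pvUrl findings[j]] := by
      rw [List.take_add_one, List.getElem?_eq_getElem (by omega)]
      simp [hu]
    rw [List.range'_succ, List.filter_cons, hdrop]
    simp only [pvKeep, hget]
    by_cases h : pvUrl findings[j] ≠ "" ∧ pvUrl findings[j] ∉ urls.take j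
    · rw [if_pos (by simpa using h), if_pos h,
        PySem.List.enumerate_cons, List.map_cons, PySem.List.enumerate_cons, List.map_cons]
      dsimp only
      have hfmt : pvFmtB findings urls k j = pvFmt k findings[j] := by
        have h1 : findings[j]?.getD [] = findings[j] := by
          rw [List.getElem?_eq_getElem hjlt]; rfl
        have h2 : urls[j]?.getD "" = pvUrl findings[j] := by
          rw [List.getElem?_eq_getElem (show j < urls.length by omega)]
          simp [hu]
        simp [pvFmtB, pvFmt, pvUrl, List.getD, h1, h2]
      rw [hfmt, ih (j + 1) (k + 1) (by omega), htake]
    · rw [if_neg (by simpa using h), if_neg h]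
      rw [ih (j + 1) k (by omega), htake]

-- ===== VERDICT (by name: the statement is the Claim_ definition above) =====
theorem build_sources_list_py_spec : Claim_equal_build_sources_list_py := by
  intro findings _
  unfold Spec_build_sources_list_py build_sources_list_py build_sources_list_py_alt
  have hA := pv_keyA findings PySem.Set.empty [] [] (by simp [PySem.Set.empty])
  have hB := pv_keyB findings
    (findings.map (fun f => PySem.Dict.getD (PySem.Dict.mk f) "source_url" ""))
    (by simp [pvUrl]) findings.length 0 1 (by omega)
  simp only [List.nil_append, List.length_nil, Nat.cast_zero, zero_add] at hA
  simp only [List.take_zero, List.drop_zero] at hB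
  dsimp only
  simp only [List.length_map, List.range_eq_range']
  rw [hA, ← hB]
  split_ifs <;> simp_all
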